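-- pv_equiv track=rewrite | github.com/kaellandrade/SI_UFS | unid_2/algunsAlgoritmosDosSlidesDaProf/robotCoinCollection.py | RobotCoinCollection
-- ===== SOURCE A (Python) =====
-- def RobotCoinCollection(matrix: list) -> int:
--     '''
--         Aplicando programação dinâmica para computar o maior
--         número de moedas que um robô pode coletar em um tabuleiro
--         n x m iniciando em (1,1) e movendo para direita e para baixo.
--
--         ENTRADA: Matriz n x m onde os elementos contém 0 ou 1 para
--         representar a falta de uma moeda ou a existência, respectivamente.
--         SAÍDA: Maior número de moedas coletadas.
--     '''
--     n = len(matrix)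
--     m = len(matrix[0])
--     F = [[0 for i in range(m)] for j in range(n)]
--     F[0][0] = matrix[0][0]
--     for j in range(1, m):
--         F[0][j] = F[0][j-1] + matrix[0][j]
--
--     for i in range(1, n):
--         F[i][0] = F[i-1][0]+matrix[i][0]
--         for j in range(1, m):
--             F[i][j] = max(F[i-1][j], F[i][j-1])+matrix[i][j]
--
--     return F[n-1][m-1]
-- ===== SOURCE B (Python) =====
-- def RobotCoinCollection(matrix: list) -> int:
--     '''Top-down memoized recursion over the grid instead of filling the DP table row by row.'''
--     n = len(matrix)
--     m = len(matrix[0])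
--     memo = {}
--
--     def best(i, j):
--         if (i, j) in memo:
--             return memo[(i, j)]
--         if i == 0 and j == 0:
--             v = matrix[0][0]
--         elif i == 0:
--             v = best(0, j - 1) + matrix[0][j]
--         elif j == 0:
--             v = best(i - 1, 0) + matrix[i][0]
--         else:
--             v = max(best(i - 1, j), best(i, j - 1)) + matrix[i][j]
--         memo[(i, j)] = v
--         return v
--
--     return best(n - 1, m - 1)
-- ===== Notes on version B (the rewrite author's own statement) =====
-- stated objective: alternative
-- what changed: Replaces A's bottom-up row-by-row DP table fill with a top-down memoized recursion best(i,j) over the grid, caching cell values in a dict and demanding only the cells reachable from the target.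
-- outside the precondition, e.g. on RobotCoinCollection([[1, 2], [3]]): A raises IndexError, B raises IndexError; on RobotCoinCollection([]): A raises IndexError, B raises IndexError
import Mathlib
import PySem

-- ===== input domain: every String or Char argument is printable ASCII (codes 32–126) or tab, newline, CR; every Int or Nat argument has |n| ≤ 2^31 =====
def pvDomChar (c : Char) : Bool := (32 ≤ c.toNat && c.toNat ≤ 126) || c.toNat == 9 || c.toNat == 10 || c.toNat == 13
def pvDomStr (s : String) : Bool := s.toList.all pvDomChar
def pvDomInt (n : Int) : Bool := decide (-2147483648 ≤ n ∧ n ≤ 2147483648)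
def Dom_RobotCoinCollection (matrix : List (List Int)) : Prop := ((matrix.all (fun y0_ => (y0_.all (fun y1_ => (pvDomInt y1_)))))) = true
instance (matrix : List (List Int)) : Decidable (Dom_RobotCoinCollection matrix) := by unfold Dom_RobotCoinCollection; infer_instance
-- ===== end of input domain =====

-- B replaces A's row-by-row DP table fill by a top-down memoized recursion over the grid
-- (same values, different decomposition); return value only, no speed claim.

-- ===== PORT A =====
-- Loop bodies of A's three loops, named for the proofs; each is the literal Python assignment.
-- Indices come from range(...) and are nonnegative, so Nat indexing with getD matches Python
-- exactly on all inputs admitted by Pre_ (every index is then in range; Python never raises there).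
def pvRow0Step (matrix : List (List Int)) (F : List (List Int)) (j : Nat) : List (List Int) :=
  F.set 0 ((F.getD 0 []).set j (((F.getD 0 []).getD (j - 1) 0) + ((matrix.getD 0 []).getD j 0)))

def pvInnerStep (matrix : List (List Int)) (i : Nat) (F : List (List Int)) (j : Nat) : List (List Int) :=
  F.set i ((F.getD i []).set j
    ((max ((F.getD (i - 1) []).getD j 0) ((F.getD i []).getD (j - 1) 0)) + ((matrix.getD i []).getD j 0)))

def pvOuterStep (matrix : List (List Int)) (F : List (List Int)) (i : Nat) : List (List Int) :=
  let F := F.set i ((F.getD i []).set 0 (((F.getD (i - 1) []).getD 0 0) + ((matrix.getD i []).getD 0 0)))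
  (List.range' 1 ((matrix.headD []).length - 1)).foldl (pvInnerStep matrix i) F

def RobotCoinCollection (matrix : List (List Int)) : Int :=
  let n := matrix.length
  let m := (matrix.headD []).length
  let F : List (List Int) := List.replicate n (List.replicate m 0)
  let F := F.set 0 ((F.getD 0 []).set 0 ((matrix.getD 0 []).getD 0 0))
  let F := (List.range' 1 (m - 1)).foldl (pvRow0Step matrix) F
  let F := (List.range' 1 (n - 1)).foldl (pvOuterStep matrix) F
  (F.getD (n - 1) []).getD (m - 1) 0

-- ===== PORT B =====
-- Source B's best(i,j): the same recursion, without the memo dict (a cache of already-computed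
-- values; it changes cost only, never any value).
def pvBest (matrix : List (List Int)) : Nat → Nat → Int
  | 0, 0 => (matrix.getD 0 []).getD 0 0
  | 0, j + 1 => pvBest matrix 0 j + (matrix.getD 0 []).getD (j + 1) 0
  | i + 1, 0 => pvBest matrix i 0 + (matrix.getD (i + 1) []).getD 0 0
  | i + 1, j + 1 =>
      max (pvBest matrix i (j + 1)) (pvBest matrix (i + 1) j) + ((matrix.getD (i + 1) []).getD (j + 1) 0)
termination_by i j => i + j

def RobotCoinCollection_alt (matrix : List (List Int)) : Int :=
  pvBest matrix (matrix.length - 1) ((matrix.headD []).length - 1)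

-- ===== PRECONDITION & SPEC =====
-- Pre_ excludes exactly the inputs where Python A raises IndexError: an empty matrix or an empty
-- first row (matrix[0][0]), and matrices where some row is shorter than row 0 (matrix[i][j] for j < m).
def Pre_RobotCoinCollection (matrix : List (List Int)) : Prop :=
  matrix ≠ [] ∧ 0 < (matrix.headD []).length ∧
    ∀ row ∈ matrix, (matrix.headD []).length ≤ row.length

instance (matrix : List (List Int)) : Decidable (Pre_RobotCoinCollection matrix) := by
  unfold Pre_RobotCoinCollection; infer_instance

def pvWitness_RobotCoinCollection : List (List Int) := [[0, 1, 1], [1, 0, 1]]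

def Spec_RobotCoinCollection (matrix : List (List Int)) (out : Int) : Prop := out = RobotCoinCollection_alt matrix
instance (matrix : List (List Int)) (out : Int) : Decidable (Spec_RobotCoinCollection matrix out) := by
  unfold Spec_RobotCoinCollection; infer_instance

-- ===== CLAIM (what is proved, stated in full; the proofs are below) =====
def Claim_equal_RobotCoinCollection : Prop := ∀ (matrix : List (List Int)), Dom_RobotCoinCollection matrix → Pre_RobotCoinCollection matrix → Spec_RobotCoinCollection matrix (RobotCoinCollection matrix)

-- ===== LEMMAS AND PROOFS =====

theorem pv_getD_set (l : List Int) (i j : Nat) (v : Int) (h : i < l.length) :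
    (l.set i v).getD j 0 = if i = j then v else l.getD j 0 := by
  simp [List.getD_eq_getElem?_getD, List.getElem?_set]
  split_ifs with h1 <;> simp_all

theorem pv_getD_set' (l : List (List Int)) (i j : Nat) (v : List Int) (h : i < l.length) :
    (l.set i v).getD j [] = if i = j then v else l.getD j [] := by
  simp [List.getD_eq_getElem?_getD, List.getElem?_set]
  split_ifs with h1 <;> simp_all

-- Invariant: F has A's table shape and carries pvBest's values on every cell of a row before
-- row i, and on the first c cells of row i.
def pvInv (matrix F : List (List Int)) (i c : Nat) : Prop :=
  F.length = matrix.length ∧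
  (∀ p, p < matrix.length → (F.getD p []).length = (matrix.headD []).length) ∧
  (∀ p q, p < matrix.length → q < (matrix.headD []).length →
    (p < i ∨ (p = i ∧ q < c)) → (F.getD p []).getD q 0 = pvBest matrix p q)

theorem pvInv_shift (matrix F : List (List Int)) (i : Nat)
    (h : pvInv matrix F i (matrix.headD []).length) : pvInv matrix F (i + 1) 0 := by
  obtain ⟨h1, h2, h3⟩ := h
  refine ⟨h1, h2, ?_⟩
  intro p q hp hq hcase
  apply h3 p q hp hq
  rcases hcase with h | ⟨_, h⟩
  · rcases Nat.lt_succ_iff_lt_or_eq.mp h with h' | h'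
    · exact Or.inl h'
    · exact Or.inr ⟨h', hq⟩
  · omega

theorem pvRow0Step_inv (matrix F : List (List Int)) (s : Nat)
    (hs : 1 ≤ s) (hsm : s < (matrix.headD []).length) (hn : 0 < matrix.length)
    (h : pvInv matrix F 0 s) : pvInv matrix (pvRow0Step matrix F s) 0 (s + 1) := by
  obtain ⟨h1, h2, h3⟩ := h
  have h0n : 0 < F.length := h1 ▸ hn
  have hrow : (F.getD 0 []).length = (matrix.headD []).length := h2 0 hn
  refine ⟨by simpa [pvRow0Step] using h1, ?_, ?_⟩
  · intro p hp
    rw [pvRow0Step, pv_getD_set' _ _ _ _ h0n]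
    by_cases he : 0 = p
    · rw [if_pos he, List.length_set]; exact hrow
    · rw [if_neg he]; exact h2 p hp
  · intro p q hp hq hcase
    have hps : p = 0 := by omega
    subst hps
    rw [pvRow0Step, pv_getD_set' _ _ _ _ h0n, if_pos rfl,
        pv_getD_set _ _ _ _ (by omega)]
    by_cases he : s = q
    · rw [if_pos he]
      subst he
      obtain ⟨s', rfl⟩ : ∃ s', s = s' + 1 := ⟨s - 1, by omega⟩
      rw [pvBest]
      simp only [Nat.add_sub_cancel]
      rw [h3 0 s' hn (by omega) (Or.inr ⟨rfl, by omega⟩)]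
    · rw [if_neg he]
      exact h3 0 q hn hq (Or.inr ⟨rfl, by omega⟩)

theorem pvInnerStep_inv (matrix F : List (List Int)) (i s : Nat)
    (hi : 1 ≤ i) (hin : i < matrix.length)
    (hs : 1 ≤ s) (hsm : s < (matrix.headD []).length)
    (h : pvInv matrix F i s) : pvInv matrix (pvInnerStep matrix i F s) i (s + 1) := by
  obtain ⟨h1, h2, h3⟩ := h
  have hiF : i < F.length := h1 ▸ hin
  have hrow : (F.getD i []).length = (matrix.headD []).length := h2 i hin
  refine ⟨by simpa [pvInnerStep] using h1, ?_, ?_⟩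
  · intro p hp
    rw [pvInnerStep, pv_getD_set' _ _ _ _ hiF]
    by_cases he : i = p
    · rw [if_pos he, List.length_set]; exact hrow
    · rw [if_neg he]; exact h2 p hp
  · intro p q hp hq hcase
    rw [pvInnerStep, pv_getD_set' _ _ _ _ hiF]
    by_cases he : i = p
    · rw [if_pos he, ← he, pv_getD_set _ _ _ _ (by omega)]
      by_cases he2 : s = q
      · rw [if_pos he2]
        subst he2
        obtain ⟨i', rfl⟩ : ∃ i', i = i' + 1 := ⟨i - 1, by omega⟩
        obtain ⟨s', rfl⟩ : ∃ s', s = s' + 1 := ⟨s - 1, by omega⟩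
        rw [pvBest]
        simp only [Nat.add_sub_cancel]
        rw [h3 i' (s' + 1) (by omega) hsm (Or.inl (by omega)),
            h3 (i' + 1) s' hin (by omega) (Or.inr ⟨rfl, by omega⟩)]
      · rw [if_neg he2]
        exact h3 i q hin hq (by omega)
    · rw [if_neg he]
      exact h3 p q hp hq (by omega)

theorem pvRow0_fold (matrix : List (List Int)) (k : Nat) :
    ∀ (F : List (List Int)) (s : Nat), 1 ≤ s → s + k ≤ (matrix.headD []).length →
    0 < matrix.length → pvInv matrix F 0 s →
    pvInv matrix ((List.range' s k).foldl (pvRow0Step matrix) F) 0 (s + k) := by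
  induction k with
  | zero => intro F s _ _ _ h; simpa using h
  | succ k ih =>
    intro F s hs hsk hn h
    rw [List.range'_succ, List.foldl_cons]
    have := ih (pvRow0Step matrix F s) (s + 1) (by omega) (by omega) hn
      (pvRow0Step_inv matrix F s hs (by omega) hn h)
    have he : s + (k + 1) = s + 1 + k := by omega
    rw [he]; exact this

theorem pvInner_fold (matrix : List (List Int)) (i : Nat) (k : Nat) :
    ∀ (F : List (List Int)) (s : Nat), 1 ≤ i → i < matrix.length → 1 ≤ s →
    s + k ≤ (matrix.headD []).length → pvInv matrix F i s →
    pvInv matrix ((List.range' s k).foldl (pvInnerStep matrix i) F) i (s + k) := by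
  induction k with
  | zero => intro F s _ _ _ _ h; simpa using h
  | succ k ih =>
    intro F s hi hin hs hsk h
    rw [List.range'_succ, List.foldl_cons]
    have := ih (pvInnerStep matrix i F s) (s + 1) hi hin (by omega) (by omega)
      (pvInnerStep_inv matrix F i s hi hin hs (by omega) h)
    have he : s + (k + 1) = s + 1 + k := by omega
    rw [he]; exact this

theorem pvOuterStep_inv (matrix F : List (List Int)) (i : Nat)
    (hi : 1 ≤ i) (hin : i < matrix.length) (hm : 0 < (matrix.headD []).length)
    (h : pvInv matrix F i 0) : pvInv matrix (pvOuterStep matrix F i) (i + 1) 0 := by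
  obtain ⟨h1, h2, h3⟩ := h
  have hiF : i < F.length := h1 ▸ hin
  have hrow : (F.getD i []).length = (matrix.headD []).length := h2 i hin
  -- after the first assignment of the outer body, row i holds pvBest at column 0
  have hstep : pvInv matrix
      (F.set i ((F.getD i []).set 0 (((F.getD (i - 1) []).getD 0 0) + ((matrix.getD i []).getD 0 0)))) i 1 := by
    refine ⟨by simpa using h1, ?_, ?_⟩
    · intro p hp
      rw [pv_getD_set' _ _ _ _ hiF]
      by_cases he : i = p
      · rw [if_pos he, List.length_set]; exact hrow
      · rw [if_neg he]; exact h2 p hp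
    · intro p q hp hq hcase
      rw [pv_getD_set' _ _ _ _ hiF]
      rcases hcase with hlt | ⟨rfl, hq1⟩
      · rw [if_neg (by omega)]
        exact h3 p q hp hq (Or.inl hlt)
      · have hq0 : q = 0 := by omega
        subst hq0
        rw [if_pos rfl, pv_getD_set _ _ _ _ (by omega), if_pos rfl]
        obtain ⟨i', rfl⟩ : ∃ i', p = i' + 1 := ⟨p - 1, by omega⟩
        rw [pvBest]
        simp only [Nat.add_sub_cancel]
        rw [h3 i' 0 (by omega) hm (Or.inl (by omega))]
  rw [pvOuterStep]
  apply pvInv_shift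
  have := pvInner_fold matrix i ((matrix.headD []).length - 1) _ 1 hi hin (by omega) (by omega) hstep
  have he : 1 + ((matrix.headD []).length - 1) = (matrix.headD []).length := by omega
  rw [he] at this
  exact this

theorem pvOuter_fold (matrix : List (List Int)) (k : Nat) :
    ∀ (F : List (List Int)) (s : Nat), 1 ≤ s → s + k ≤ matrix.length →
    0 < (matrix.headD []).length → pvInv matrix F s 0 →
    pvInv matrix ((List.range' s k).foldl (pvOuterStep matrix) F) (s + k) 0 := by
  induction k with
  | zero => intro F s _ _ _ h; simpa using h
  | succ k ih =>
    intro F s hs hsk hm h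
    rw [List.range'_succ, List.foldl_cons]
    have := ih (pvOuterStep matrix F s) (s + 1) (by omega) (by omega) hm
      (pvOuterStep_inv matrix F s hs (by omega) hm h)
    have he : s + (k + 1) = s + 1 + k := by omega
    rw [he]; exact this

theorem pv_getD_replicate (n i : Nat) (v : List Int) (h : i < n) :
    (List.replicate n v).getD i [] = v := by
  simp [List.getD_eq_getElem?_getD, h]

-- ===== VERDICT (by name: the statement is the Claim_ definition above) =====
theorem RobotCoinCollection_spec : Claim_equal_RobotCoinCollection := by
  intro matrix _ hpre
  obtain ⟨hne, hm, -⟩ := hpre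
  have hn : 0 < matrix.length := List.length_pos_iff.mpr hne
  have hF0get : (List.replicate matrix.length (List.replicate (matrix.headD []).length (0:Int))).getD 0 []
      = List.replicate (matrix.headD []).length (0:Int) := pv_getD_replicate _ _ _ hn
  have hInv1 : pvInv matrix
      ((List.replicate matrix.length (List.replicate (matrix.headD []).length (0:Int))).set 0
        (((List.replicate matrix.length (List.replicate (matrix.headD []).length (0:Int))).getD 0 []).set 0
          ((matrix.getD 0 []).getD 0 0))) 0 1 := by
    refine ⟨by simp, ?_, ?_⟩
    · intro p hp
      rw [pv_getD_set' _ _ _ _ (by simpa using hn)]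
      by_cases he : 0 = p
      · rw [if_pos he, List.length_set, hF0get]; simp
      · rw [if_neg he, pv_getD_replicate _ _ _ hp]; simp
    · intro p q hp hq hcase
      have hp0 : p = 0 := by omega
      have hq0 : q = 0 := by omega
      subst hp0; subst hq0
      rw [pv_getD_set' _ _ _ _ (by simpa using hn), if_pos rfl,
          pv_getD_set _ _ _ _ (by rw [hF0get]; simpa using hm), if_pos rfl, pvBest]
  have hInv2 : pvInv matrix ((List.range' 1 ((matrix.headD []).length - 1)).foldl (pvRow0Step matrix)
      ((List.replicate matrix.length (List.replicate (matrix.headD []).length (0:Int))).set 0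
        (((List.replicate matrix.length (List.replicate (matrix.headD []).length (0:Int))).getD 0 []).set 0
          ((matrix.getD 0 []).getD 0 0)))) 0 (matrix.headD []).length := by
    have := pvRow0_fold matrix ((matrix.headD []).length - 1) _ 1 (by omega) (by omega) hn hInv1
    have he : 1 + ((matrix.headD []).length - 1) = (matrix.headD []).length := by omega
    rwa [he] at this
  have hInv3 := pvOuter_fold matrix (matrix.length - 1) _ 1 (by omega) (by omega) hm
    (pvInv_shift matrix _ 0 hInv2)
  rw [show 1 + (matrix.length - 1) = matrix.length by omega] at hInv3
  unfold Spec_RobotCoinCollection RobotCoinCollection RobotCoinCollection_alt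
  simp only
  exact hInv3.2.2 (matrix.length - 1) ((matrix.headD []).length - 1)
    (by omega) (by omega) (Or.inl (by omega))
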